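-- pv_equiv track=rewrite | github.com/aparkin/chat-dash | services/dataset_service.py | _validate_code_structure
-- ===== SOURCE A (Python) =====
-- from typing import Dict, Any, Optional, List, Tuple, Union
--
-- def _validate_code_structure(code: str) -> Tuple[bool, Optional[str]]:
--     """Validate that code follows the required template structure.
--
--     Args:
--         code: The code block to validate
--
--     Returns:
--         Tuple[bool, Optional[str]]: (is_valid, error_message)
--     """
--     try:
--         # Check for required template elements
--         if not code.startswith("# Code ID:"):
--             return False, "Code must start with '# Code ID:' line"
--
--         # Check for analyze_data function
--         if "def analyze_data(datasets):" not in code: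
--             return False, "Code must contain analyze_data function definition"
--
--         # Check for imports
--         if any(line.strip().startswith(('import ', 'from ')) for line in code.split('\n')):
--             return False, "Code should not contain import statements - they are in the template"
--
--         # Check for function definitions
--         function_defs = [line for line in code.split('\n') if line.strip().startswith('def ')]
--         if len(function_defs) > 1:  # Only analyze_data allowed
--             return False, "Code should not contain additional function definitions"
--
--         # Check for required return structure
--         if "return result, viz_data" not in code:
--             return False, "Code must return result and viz_data"
--
--         return True, None
--
--     except Exception as e:
--         return False, f"Structure validation failed: {str(e)}"
-- ===== SOURCE B (Python) =====
-- WS = " \t\r\v\f"  # line-internal whitespace (str.strip() whitespace minus the line separator)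
--
--
-- def _probe(code: str, i: int, kw: str) -> bool:
--     """At index i (first non-blank of a line): does this line, once stripped,
--     start with `kw`?  `kw` ends in a space, so that space must survive the
--     right-strip: some non-blank character must follow before the line ends."""
--     if not code.startswith(kw, i):
--         return False
--     j = i + len(kw)
--     while j < len(code) and code[j] in WS:
--         j += 1
--     return j < len(code) and code[j] != '\n'
--
--
-- def _validate_code_structure(code: str):
--     """Validate that code follows the required template structure.
--
--     Single character-level scan with an index cursor: for each line, skip the
--     leading blanks, probe the keyword, then skip to the next newline; no
--     split()/strip() intermediate lists are built.
--     """
--     has_import = False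
--     def_count = 0
--     i, n = 0, len(code)
--     while i < n:
--         while i < n and code[i] in WS:
--             i += 1
--         if _probe(code, i, "import ") or _probe(code, i, "from "):
--             has_import = True
--         elif _probe(code, i, "def "):
--             def_count += 1
--         while i < n and code[i] != '\n':
--             i += 1
--         i += 1
--     if not code.startswith("# Code ID:"):
--         return False, "Code must start with '# Code ID:' line"
--     if "def analyze_data(datasets):" not in code:
--         return False, "Code must contain analyze_data function definition"
--     if has_import:
--         return False, "Code should not contain import statements - they are in the template"
--     if def_count > 1:
--         return False, "Code should not contain additional function definitions"
--     if "return result, viz_data" not in code: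
--         return False, "Code must return result and viz_data"
--     return True, None
-- ===== Notes on version B (the rewrite author's own statement) =====
-- stated objective: alternative
-- what changed: Replaced A's line-list passes (split(' ') twice, strip() and startswith per line, any()/comprehension) by a single character-level scan with an index cursor that classifies each line in place — skip blanks, probe the keyword, skip to the newline — building no intermediate line/stripped strings; the five checks then run in A's order, and the dead try/except is dropped since nothing can raise.
import Mathlib
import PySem

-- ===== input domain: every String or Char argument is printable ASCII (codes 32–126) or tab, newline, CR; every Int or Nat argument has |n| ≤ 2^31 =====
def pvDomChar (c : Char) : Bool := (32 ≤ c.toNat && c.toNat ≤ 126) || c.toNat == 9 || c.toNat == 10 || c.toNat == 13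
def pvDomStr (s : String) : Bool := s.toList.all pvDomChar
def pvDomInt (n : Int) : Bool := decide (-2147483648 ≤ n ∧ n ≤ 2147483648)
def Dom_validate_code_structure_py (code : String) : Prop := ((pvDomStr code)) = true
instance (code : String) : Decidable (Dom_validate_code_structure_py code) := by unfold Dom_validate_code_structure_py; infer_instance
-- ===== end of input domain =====

-- B replaces A's split/strip/startswith line passes by one character-level scan with an index cursor (simpler machinery, same result).

-- ===== PORT A =====
def validate_code_structure_py (code : String) : Bool × Option String :=
  if ¬ (PySem.Str.startswith code "# Code ID:" = true) then
    (false, some "Code must start with '# Code ID:' line")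
  else if ¬ (PySem.Str.isIn "def analyze_data(datasets):" code = true) then
    (false, some "Code must contain analyze_data function definition")
  else if ((PySem.Str.split? code "\n").getD []).any (fun line =>
      PySem.Str.startswith (PySem.Str.strip line) "import " ||
      PySem.Str.startswith (PySem.Str.strip line) "from ") then
    (false, some "Code should not contain import statements - they are in the template")
  else if (((PySem.Str.split? code "\n").getD []).filter (fun line =>
      PySem.Str.startswith (PySem.Str.strip line) "def ")).length > 1 then
    (false, some "Code should not contain additional function definitions")
  else if ¬ (PySem.Str.isIn "return result, viz_data" code = true) then
    (false, some "Code must return result and viz_data")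
  else (true, none)

-- ===== PORT B =====
-- Source B WS = " \t\r\v\f" (line-internal whitespace)
def pvIsWS (c : Char) : Bool := c == ' ' || c == '\t' || c == '\r' || c == Char.ofNat 11 || c == Char.ofNat 12

-- Source B _probe: keyword prefix at the cursor, then skip blanks, then a non-newline char must remain
def pvProbe (t : List Char) (kw : List Char) : Bool :=
  if kw.isPrefixOf t then
    match (t.drop kw.length).dropWhile pvIsWS with
    | [] => false
    | c :: _ => c != '\n'
  else false

-- Source B main while loop: cursor scan, one line per round (skip blanks, probe, skip to '\n')
def pvScanB (cs : List Char) (imp : Bool) (d : Int) : Bool × Int :=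
  match cs with
  | [] => (imp, d)
  | c :: cs' =>
    let t := (c :: cs').dropWhile pvIsWS
    let st : Bool × Int :=
      if pvProbe t "import ".toList || pvProbe t "from ".toList then (true, d)
      else if pvProbe t "def ".toList then (imp, d + 1)
      else (imp, d)
    pvScanB ((t.dropWhile (fun x => !(x == '\n'))).drop 1) st.1 st.2
  termination_by cs.length
  decreasing_by
    simp only [List.length_cons, List.length_drop]
    have h1 : ((c :: cs').dropWhile pvIsWS).length ≤ cs'.length + 1 :=
      List.length_dropWhile_le _ _
    have h2 := List.length_dropWhile_le (fun x => !(x == '\n')) ((c :: cs').dropWhile pvIsWS)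
    omega

def validate_code_structure_py_alt (code : String) : Bool × Option String :=
  let st := pvScanB code.toList false 0
  if ¬ (PySem.Str.startswith code "# Code ID:" = true) then
    (false, some "Code must start with '# Code ID:' line")
  else if ¬ (PySem.Str.isIn "def analyze_data(datasets):" code = true) then
    (false, some "Code must contain analyze_data function definition")
  else if st.1 then
    (false, some "Code should not contain import statements - they are in the template")
  else if st.2 > 1 then
    (false, some "Code should not contain additional function definitions")
  else if ¬ (PySem.Str.isIn "return result, viz_data" code = true) then
    (false, some "Code must return result and viz_data")
  else (true, none)

-- ===== PRECONDITION & SPEC =====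
def Spec_validate_code_structure_py (code : String) (out : Bool × Option String) : Prop := out = validate_code_structure_py_alt code
instance (code : String) (out : Bool × Option String) : Decidable (Spec_validate_code_structure_py code out) := by unfold Spec_validate_code_structure_py; infer_instance

-- ===== CLAIM (what is proved, stated in full; the proofs are below) =====
def Claim_equal_validate_code_structure_py : Prop := ∀ (code : String), Dom_validate_code_structure_py code → Spec_validate_code_structure_py code (validate_code_structure_py code)


-- ===== LEMMAS AND PROOFS =====

-- A's per-line predicates, at the character level
def pvPA (l : List Char) : Bool :=
  PySem.Chars.startswith (PySem.Chars.strip l) "import ".toList ||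
  PySem.Chars.startswith (PySem.Chars.strip l) "from ".toList
def pvQA (l : List Char) : Bool :=
  PySem.Chars.startswith (PySem.Chars.strip l) "def ".toList

theorem pv_beq_toNat (c d : Char) : (c == d) = decide (c.toNat = d.toNat) := by
  by_cases h : c.toNat = d.toNat
  · have he : c = d := Char.ext (UInt32.toNat_inj.mp h)
    simp [he]
  · have hne : c ≠ d := fun he => h (by rw [he])
    simp [hne, h]

-- Source B's blank set agrees with Python's str-whitespace on domain characters other than '\n'
theorem pv_ws_eq (c : Char) (hd : pvDomChar c = true) (hn : (c == '\n') = false) :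
    pvIsWS c = PySem.Chars.isspace c := by
  simp only [pvDomChar, Bool.or_eq_true, Bool.and_eq_true, decide_eq_true_eq, beq_iff_eq] at hd
  rw [pv_beq_toNat] at hn
  simp only [decide_eq_false_iff_not] at hn
  simp only [pvIsWS, PySem.Chars.isspace, pv_beq_toNat]
  have h32 : (' ' : Char).toNat = 32 := by decide
  have h9 : ('\t' : Char).toNat = 9 := by decide
  have h13 : ('\r' : Char).toNat = 13 := by decide
  have h11 : (Char.ofNat 11).toNat = 11 := by decide
  have h12 : (Char.ofNat 12).toNat = 12 := by decide
  have h10 : ('\n' : Char).toNat = 10 := by decide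
  rw [h32, h9, h13, h11, h12]
  rw [h10] at hn
  rw [Bool.eq_iff_iff]
  simp only [Bool.or_eq_true, Bool.and_eq_true, decide_eq_true_eq]
  omega

theorem pv_go_acc (fuel : Nat) (l cur : List Char) (acc : List (List Char)) :
    PySem.Chars.splitOn.go ['\n'] fuel l cur acc
      = acc.reverse ++ PySem.Chars.splitOn.go ['\n'] fuel l cur [] := by
  induction fuel generalizing l cur acc with
  | zero => simp [PySem.Chars.splitOn.go]
  | succ f ih =>
    match l with
    | [] => simp [PySem.Chars.splitOn.go]
    | c :: rest =>
      rw [PySem.Chars.splitOn.go, PySem.Chars.splitOn.go]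
      by_cases hp : (['\n'].isPrefixOf (c :: rest)) = true
      · simp only [hp, if_true]
        rw [ih _ _ ((cur.reverse :: acc)), ih _ _ [cur.reverse]]
        simp
      · simp only [hp]
        simp only [Bool.false_eq_true, if_false]
        exact ih _ _ _

theorem pv_go_noNl (l : List Char) (h : '\n' ∉ l) :
    ∀ fuel, l.length ≤ fuel → ∀ cur acc, PySem.Chars.splitOn.go ['\n'] fuel l cur acc
      = ((cur.reverse ++ l) :: acc).reverse := by
  induction l with
  | nil =>
    intro fuel _ cur acc
    match fuel with
    | 0 => simp [PySem.Chars.splitOn.go]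
    | f + 1 => simp [PySem.Chars.splitOn.go]
  | cons c rest ih =>
    intro fuel hf cur acc
    match fuel with
    | f + 1 =>
      rw [PySem.Chars.splitOn.go]
      have hc : c ≠ '\n' := fun he => h (he ▸ List.mem_cons_self)
      have hp : (['\n'].isPrefixOf (c :: rest)) = false := by
        simp [List.isPrefixOf]
        exact fun he => hc he.symm
      simp only [hp, Bool.false_eq_true, if_false]
      rw [ih (fun hm => h (List.mem_cons_of_mem _ hm)) f (by simpa using hf) (c :: cur) acc]
      simp

theorem pv_go_split (l : List Char) (hn : '\n' ∉ l) :
    ∀ (r : List Char) (f : Nat) (cur : List Char) (acc : List (List Char)),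
      PySem.Chars.splitOn.go ['\n'] (l.length + 1 + f) (l ++ '\n' :: r) cur acc
        = PySem.Chars.splitOn.go ['\n'] f r [] ((cur.reverse ++ l) :: acc) := by
  induction l with
  | nil =>
    intro r f cur acc
    rw [show ([] : List Char).length + 1 + f = f + 1 by simp; omega]
    rw [List.nil_append, PySem.Chars.splitOn.go]
    have hp : (['\n'].isPrefixOf ('\n' :: r)) = true := by simp [List.isPrefixOf]
    simp [hp]
  | cons c rest ih =>
    intro r f cur acc
    have hc : c ≠ '\n' := fun he => hn (he ▸ List.mem_cons_self)
    rw [show (c :: rest).length + 1 + f = (rest.length + 1 + f) + 1 by simp; omega]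
    rw [List.cons_append, PySem.Chars.splitOn.go]
    have hp : (['\n'].isPrefixOf (c :: (rest ++ '\n' :: r))) = false := by
      simp [List.isPrefixOf]
      exact fun he => hc he.symm
    simp only [hp, Bool.false_eq_true, if_false]
    rw [ih (fun hm => hn (List.mem_cons_of_mem _ hm)) r f (c :: cur) acc]
    simp

theorem pv_splitOn_noNl (l : List Char) (h : '\n' ∉ l) :
    PySem.Chars.splitOn l ['\n'] = [l] := by
  rw [PySem.Chars.splitOn, pv_go_noNl l h (l.length + 1) (by omega)]
  simp

theorem pv_splitOn_split (l r : List Char) (h : '\n' ∉ l) :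
    PySem.Chars.splitOn (l ++ '\n' :: r) ['\n'] = l :: PySem.Chars.splitOn r ['\n'] := by
  rw [PySem.Chars.splitOn]
  rw [show (l ++ '\n' :: r).length + 1 = l.length + 1 + (r.length + 1) by simp; omega]
  rw [pv_go_split l h r (r.length + 1) [] []]
  simp only [List.reverse_nil, List.nil_append]
  rw [pv_go_acc]
  simp [PySem.Chars.splitOn]

theorem pv_rstrip_decomp (t : List Char) :
    t = PySem.Chars.rstrip t ++ (t.reverse.takeWhile PySem.Chars.isspace).reverse
      ∧ ∀ c ∈ (t.reverse.takeWhile PySem.Chars.isspace).reverse, PySem.Chars.isspace c = true := by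
  constructor
  · conv_lhs => rw [← List.reverse_reverse t, ← List.takeWhile_append_dropWhile (p := PySem.Chars.isspace) (l := t.reverse)]
    rw [List.reverse_append]
    rfl
  · intro c hc
    rw [List.mem_reverse] at hc
    exact List.mem_takeWhile_imp hc

-- "kw + ' ' is a prefix of t.rstrip()" characterised without rstrip
theorem pv_prefix_rstrip_iff (t kw : List Char) :
    (kw ++ [' ']) <+: PySem.Chars.rstrip t
      ↔ ((kw ++ [' ']) <+: t ∧ ∃ c ∈ t.drop (kw.length + 1), PySem.Chars.isspace c = false) := by
  obtain ⟨hdec, hb⟩ := pv_rstrip_decomp t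
  set b := (t.reverse.takeWhile PySem.Chars.isspace).reverse with hbdef
  constructor
  · rintro ⟨u₀, hu⟩
    have hpre : (kw ++ [' ']) <+: t := by
      rw [hdec, ← hu]
      exact ⟨u₀ ++ b, by simp⟩
    refine ⟨hpre, ?_⟩
    have hne : PySem.Chars.rstrip t ≠ [] := by
      intro h0; rw [h0] at hu; simp at hu
    have hd : t.reverse.dropWhile PySem.Chars.isspace ≠ [] := by
      intro h0
      apply hne
      rw [PySem.Chars.rstrip, h0]
      rfl
    obtain ⟨a, tl, ha⟩ := List.exists_cons_of_ne_nil hd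
    have hans : PySem.Chars.isspace a = false := by
      have := List.head_dropWhile_not PySem.Chars.isspace hd
      simp only [ha, List.head_cons] at this
      exact this
    have hrs : PySem.Chars.rstrip t = tl.reverse ++ [a] := by
      rw [PySem.Chars.rstrip, ha]; simp
    have hdropt : t.drop (kw.length + 1) = u₀ ++ b := by
      conv_lhs => rw [hdec, ← hu]
      rw [List.append_assoc]
      rw [show kw.length + 1 = (kw ++ [' ']).length by simp]
      exact List.drop_left
    rcases Decidable.em (u₀ = []) with h0 | h0
    · exfalso
      rw [h0, List.append_nil] at hu
      have h1 : (kw ++ [' ']).getLast? = some ' ' := List.getLast?_concat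
      rw [hu, hrs, List.getLast?_concat] at h1
      have ha' : a = ' ' := by injection h1
      rw [ha'] at hans
      exact absurd hans (by decide)
    · have h1 : (PySem.Chars.rstrip t).getLast? = u₀.getLast? := by
        rw [← hu]
        exact List.getLast?_append_of_ne_nil _ h0
      rw [hrs, List.getLast?_concat] at h1
      have hmem : a ∈ u₀ := List.mem_of_getLast? h1.symm
      exact ⟨a, by rw [hdropt]; exact List.mem_append_left _ hmem, hans⟩
  · rintro ⟨hpre, c, hc, hcs⟩
    have hlen : kw.length + 1 ≤ (PySem.Chars.rstrip t).length := by
      by_contra hlt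
      push Not at hlt
      have hdrop : t.drop (kw.length + 1) = b.drop (kw.length + 1 - (PySem.Chars.rstrip t).length) := by
        conv_lhs => rw [hdec]
        rw [List.drop_append]
        rw [List.drop_eq_nil_of_le (by omega), List.nil_append]
      rw [hdrop] at hc
      exact absurd (hb c (List.mem_of_mem_drop hc)) (by simp [hcs])
    refine List.prefix_of_prefix_length_le hpre ?_ (by simp; omega)
    exact ⟨b, hdec.symm⟩

theorem pv_dropWhile_congr (p q : Char → Bool) (l : List Char) (h : ∀ c ∈ l, p c = q c) :
    l.dropWhile p = l.dropWhile q := by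
  induction l with
  | nil => rfl
  | cons x xs ih =>
    simp only [List.dropWhile_cons]
    rw [h x List.mem_cons_self]
    split
    · exact ih (fun c hc => h c (List.mem_cons_of_mem _ hc))
    · rfl

-- Source B's probe at the first non-blank of a line computes A's strip().startswith(kw + ' ')
theorem pv_probe_line (l tail kw : List Char)
    (hnl : '\n' ∉ l)
    (hdom : ∀ c ∈ l, pvDomChar c = true)
    (htail : tail = [] ∨ ∃ r, tail = '\n' :: r)
    (hkw : '\n' ∉ kw ++ [' ']) :
    pvProbe (l.dropWhile pvIsWS ++ tail) (kw ++ [' '])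
      = PySem.Chars.startswith (PySem.Chars.strip l) (kw ++ [' ']) := by
  set pat := kw ++ [' '] with hpat
  set t := l.dropWhile pvIsWS with ht
  have hsub : ∀ c ∈ t, c ∈ l := fun c hc => (List.dropWhile_suffix pvIsWS).subset hc
  have htstrip : l.dropWhile PySem.Chars.isspace = t := by
    rw [ht]
    exact pv_dropWhile_congr _ _ l (fun c hc =>
      (pv_ws_eq c (hdom c hc) (by simp; exact fun he => hnl (he ▸ hc))).symm)
  have hstrip : PySem.Chars.strip l = PySem.Chars.rstrip t := by
    rw [PySem.Chars.strip, PySem.Chars.lstrip, htstrip]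
  rw [hstrip]
  have hpatlen : pat.length = kw.length + 1 := by simp [hpat]
  by_cases hp : pat.isPrefixOf (t ++ tail) = true
  · have hple : pat.length ≤ t.length := by
      by_contra hgt
      push Not at hgt
      have hpre := (PySem.Chars.startswith_iff (t ++ tail) pat).mp (by rw [PySem.Chars.startswith]; exact hp)
      have hlen2 : pat.length ≤ t.length + tail.length := by
        have := hpre.length_le; simpa using this
      obtain ⟨r, hr⟩ : ∃ r, tail = '\n' :: r := by
        rcases htail with h0 | h0
        · exfalso; rw [h0] at hlen2; simp at hlen2; omega
        · exact h0
      subst hr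
      have hbound : t.length < (t ++ '\n' :: r).length := by simp
      have hnth : pat[t.length]'(by omega) = (t ++ '\n' :: r)[t.length]'hbound :=
        List.IsPrefix.getElem hpre (by omega)
      have h2 : (t ++ '\n' :: r)[t.length]'hbound = '\n' := by
        rw [List.getElem_append_right (le_refl t.length)]
        simp
      apply hkw
      have h3 : pat[t.length]'(by omega) = '\n' := hnth.trans h2
      rw [← h3]
      exact List.getElem_mem _
    have hpret : pat <+: t := by
      have hpre := (PySem.Chars.startswith_iff (t ++ tail) pat).mp (by rw [PySem.Chars.startswith]; exact hp)
      exact List.prefix_of_prefix_length_le hpre (List.prefix_append t tail) hple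
    obtain ⟨u, hu⟩ := hpret
    have hdrop1 : (t ++ tail).drop pat.length = u ++ tail := by
      rw [← hu, List.append_assoc, List.drop_left]
    have hdropt : t.drop pat.length = u := by rw [← hu, List.drop_left]
    have hdw : (u ++ tail).dropWhile pvIsWS = u.dropWhile pvIsWS ++ tail := by
      rw [List.dropWhile_append]
      split
      · rename_i he
        rw [List.isEmpty_iff] at he
        rw [he, List.nil_append]
        rcases htail with h0 | ⟨r, h0⟩
        · rw [h0]; rfl
        · rw [h0, List.dropWhile_cons]
          have hws : pvIsWS '\n' = false := by decide
          rw [hws]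
          simp
      · rfl
    rw [pvProbe, if_pos hp, hdrop1, hdw]
    match hu' : u.dropWhile pvIsWS with
    | c :: rest =>
      have hcu : c ∈ u := (List.dropWhile_suffix pvIsWS).subset (hu' ▸ List.mem_cons_self)
      have hcl : c ∈ l := hsub c (by rw [← hu]; exact List.mem_append_right _ hcu)
      have hcn : c ≠ '\n' := fun he => hnl (he ▸ hcl)
      have hlhs : (c != '\n') = true := by simp [hcn]
      simp only [List.cons_append, hlhs]
      have hcws : pvIsWS c = false := by
        have hne : u.dropWhile pvIsWS ≠ [] := by simp [hu']
        have := List.head_dropWhile_not pvIsWS hne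
        simp only [hu', List.head_cons] at this
        exact this
      have hcss : PySem.Chars.isspace c = false := by
        rw [← pv_ws_eq c (hdom c hcl) (by simp [hcn]), hcws]
      have : pat <+: PySem.Chars.rstrip t := by
        rw [hpat]
        rw [pv_prefix_rstrip_iff]
        exact ⟨hpat ▸ ⟨u, hu⟩, c, by rw [← hpatlen, hdropt]; exact hcu, hcss⟩
      rw [PySem.Chars.startswith]
      symm
      rwa [List.isPrefixOf_iff_prefix]
    | [] =>
      have hall : ∀ c ∈ u, pvIsWS c = true := List.dropWhile_eq_nil_iff.mp hu'
      have hlhs : (match ([] ++ tail : List Char) with | [] => false | c :: _ => c != '\n') = false := by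
        rcases htail with h0 | ⟨r, h0⟩ <;> rw [h0] <;> simp
      rw [hlhs]
      symm
      rw [PySem.Chars.startswith]
      rw [← Bool.not_eq_true, List.isPrefixOf_iff_prefix, hpat, pv_prefix_rstrip_iff]
      rintro ⟨-, c, hc, hcs⟩
      rw [← hpatlen, hdropt] at hc
      have hcl : c ∈ l := hsub c (by rw [← hu]; exact List.mem_append_right _ hc)
      rw [← pv_ws_eq c (hdom c hcl) (by simp; exact fun he => hnl (he ▸ hcl))] at hcs
      rw [hall c hc] at hcs
      exact absurd hcs (by simp)
  · rw [pvProbe, if_neg hp]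
    symm
    rw [PySem.Chars.startswith, ← Bool.not_eq_true, List.isPrefixOf_iff_prefix, hpat,
      pv_prefix_rstrip_iff]
    rintro ⟨hpre, -⟩
    exact hp (by rw [List.isPrefixOf_iff_prefix]; exact hpre.trans (List.prefix_append t tail))

-- two stripped-prefix keywords with different first letters cannot both hold
theorem pv_startswith_excl (s p q : List Char) (a b : Char) (hne : a ≠ b)
    (h : PySem.Chars.startswith s (a :: p) = true) :
    PySem.Chars.startswith s (b :: q) = false := by
  rw [PySem.Chars.startswith, List.isPrefixOf_iff_prefix] at h
  obtain ⟨w, rfl⟩ := h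
  rw [PySem.Chars.startswith, ← Bool.not_eq_true, List.isPrefixOf_iff_prefix]
  intro hb
  rw [List.cons_append, List.cons_prefix_cons] at hb
  exact hne (hb.1.symm)


-- one round of Source B's loop = A's two per-line predicates, combined
theorem pv_step_eq (l tail : List Char)
    (hnl : '\n' ∉ l)
    (hdom : ∀ c ∈ l, pvDomChar c = true)
    (htail : tail = [] ∨ ∃ r, tail = '\n' :: r)
    (imp : Bool) (d : Int) :
    (if pvProbe (l.dropWhile pvIsWS ++ tail) "import ".toList
        || pvProbe (l.dropWhile pvIsWS ++ tail) "from ".toList then ((true : Bool), d)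
     else if pvProbe (l.dropWhile pvIsWS ++ tail) "def ".toList then (imp, d + 1)
     else (imp, d))
    = (imp || pvPA l, d + if pvQA l then 1 else 0) := by
  have hi : ("import " : String).toList = "import".toList ++ [' '] := by decide
  have hf : ("from " : String).toList = "from".toList ++ [' '] := by decide
  have hd' : ("def " : String).toList = "def".toList ++ [' '] := by decide
  rw [hi, hf, hd']
  rw [pv_probe_line l tail "import".toList hnl hdom htail (by decide)]
  rw [pv_probe_line l tail "from".toList hnl hdom htail (by decide)]
  rw [pv_probe_line l tail "def".toList hnl hdom htail (by decide)]
  have hpa : pvPA l = (PySem.Chars.startswith (PySem.Chars.strip l) ("import".toList ++ [' '])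
      || PySem.Chars.startswith (PySem.Chars.strip l) ("from".toList ++ [' '])) := by
    rw [pvPA, ← hi, ← hf]
  have hqa : pvQA l = PySem.Chars.startswith (PySem.Chars.strip l) ("def".toList ++ [' ']) := by
    rw [pvQA, ← hd']
  by_cases h1 : (PySem.Chars.startswith (PySem.Chars.strip l) ("import".toList ++ [' '])
      || PySem.Chars.startswith (PySem.Chars.strip l) ("from".toList ++ [' '])) = true
  · rw [if_pos h1]
    have hq : pvQA l = false := by
      rw [hqa]
      rcases Bool.or_eq_true_iff.mp h1 with h | h
      · exact pv_startswith_excl _ _ ("ef ".toList) 'i' 'd' (by decide)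
          (by rw [show ('i' :: "mport ".toList : List Char) = "import".toList ++ [' '] by decide]; exact h)
      · exact pv_startswith_excl _ _ ("ef ".toList) 'f' 'd' (by decide)
          (by rw [show ('f' :: "rom ".toList : List Char) = "from".toList ++ [' '] by decide]; exact h)
    rw [hq, hpa, h1]
    simp
  · rw [if_neg h1]
    have hpa' : pvPA l = false := by rw [hpa]; simpa using h1
    by_cases h2 : PySem.Chars.startswith (PySem.Chars.strip l) ("def".toList ++ [' ']) = true
    · rw [if_pos h2, hpa', hqa, h2]
      simp
    · rw [if_neg h2, hpa', hqa]
      simp only [Bool.or_false]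
      rw [show PySem.Chars.startswith (PySem.Chars.strip l) ("def".toList ++ [' ']) = false from by simpa using h2]
      simp

theorem pv_dwws_append (l r : List Char) :
    (l ++ '\n' :: r).dropWhile pvIsWS = l.dropWhile pvIsWS ++ '\n' :: r := by
  rw [List.dropWhile_append]
  split
  · rename_i he
    rw [List.isEmpty_iff] at he
    rw [he, List.nil_append, List.dropWhile_cons]
    have hws : pvIsWS '\n' = false := by decide
    rw [hws]
    simp
  · rfl

-- Source B's whole loop computes A's any-pass and def-count over split('\n')
theorem pv_scan_eq : ∀ (n : Nat) (cs : List Char), cs.length ≤ n → ∀ (imp : Bool) (d : Int),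
    (∀ c ∈ cs, pvDomChar c = true) →
    pvScanB cs imp d = (imp || (PySem.Chars.splitOn cs ['\n']).any pvPA,
      d + (((PySem.Chars.splitOn cs ['\n']).filter pvQA).length : Int)) := by
  intro n
  induction n with
  | zero =>
    intro cs hlen imp d _
    have h0 : cs = [] := List.length_eq_zero_iff.mp (Nat.le_zero.mp hlen)
    subst h0
    rw [pvScanB, pv_splitOn_noNl [] (by simp)]
    have h1 : pvPA [] = false := by decide
    have h2 : pvQA [] = false := by decide
    simp [h1, h2]
  | succ n ih =>
    intro cs hlen imp d hdom
    match cs with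
    | [] =>
      rw [pvScanB, pv_splitOn_noNl [] (by simp)]
      have h1 : pvPA [] = false := by decide
      have h2 : pvQA [] = false := by decide
      simp [h1, h2]
    | c :: cs' =>
      by_cases hmem : '\n' ∈ (c :: cs')
      · -- split off the first line
        set l := (c :: cs').takeWhile (fun x => !(x == '\n')) with hldef
        set rest := (c :: cs').dropWhile (fun x => !(x == '\n')) with hrdef
        have hcs : (c :: cs') = l ++ rest := (List.takeWhile_append_dropWhile).symm
        have hnl : '\n' ∉ l := by
          intro hm
          have := List.mem_takeWhile_imp hm
          simp at this
        have hne : rest ≠ [] := by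
          intro h0
          rw [h0, List.append_nil] at hcs
          exact hnl (hcs ▸ hmem)
        obtain ⟨x, r, hxr⟩ := List.exists_cons_of_ne_nil hne
        have hne2 : (c :: cs').dropWhile (fun x => !(x == '\n')) ≠ [] := by
          rw [← hrdef]; exact hne
        have hx : x = '\n' := by
          have h5 := List.head_dropWhile_not (fun x => !(x == '\n')) hne2
          have h7 : (c :: cs').dropWhile (fun x => !(x == '\n')) = x :: r := by
            rw [← hrdef]; exact hxr
          simp only [h7, List.head_cons] at h5
          simpa using h5
        rw [hx] at hxr
        have hcs2 : (c :: cs') = l ++ '\n' :: r := by rw [hcs, hxr]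
        have hdoml : ∀ ch ∈ l, pvDomChar ch = true := fun ch hc =>
          hdom ch (by rw [hcs2]; exact List.mem_append_left _ hc)
        have hdomr : ∀ ch ∈ r, pvDomChar ch = true := fun ch hc =>
          hdom ch (by rw [hcs2]; exact List.mem_append_right _ (List.mem_cons_of_mem _ hc))
        have hlenr : r.length ≤ n := by
          have := hlen
          rw [hcs2] at this
          simp at this
          omega
        rw [pvScanB.eq_def]
        simp only []
        have ht : (c :: cs').dropWhile pvIsWS = l.dropWhile pvIsWS ++ '\n' :: r := by
          conv_lhs => rw [hcs2]
          exact pv_dwws_append l r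
        rw [ht]
        have hmatch : (l.dropWhile pvIsWS ++ '\n' :: r).dropWhile (fun x => !(x == '\n'))
            = '\n' :: r := by
          rw [List.dropWhile_append]
          have hall : (l.dropWhile pvIsWS).dropWhile (fun x => !(x == '\n')) = [] := by
            rw [List.dropWhile_eq_nil_iff]
            intro ch hc
            have hcl : ch ∈ l := (List.dropWhile_suffix pvIsWS).subset hc
            have : ch ≠ '\n' := fun he => hnl (he ▸ hcl)
            simpa using this
          rw [hall]
          simp
        rw [hmatch]
        simp only [List.drop_one, List.tail_cons]
        rw [pv_step_eq l ('\n' :: r) hnl hdoml (Or.inr ⟨r, rfl⟩) imp d]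
        rw [ih r hlenr _ _ hdomr]
        rw [show PySem.Chars.splitOn (c :: cs') ['\n'] = l :: PySem.Chars.splitOn r ['\n'] from by
          rw [hcs2]; exact pv_splitOn_split l r hnl]
        rw [List.any_cons, List.filter_cons]
        by_cases hq : pvQA l = true
        · rw [hq]
          simp only [if_true, List.length_cons, Bool.or_assoc, Prod.mk.injEq]
          exact ⟨trivial, by push_cast; ring⟩

        · rw [show pvQA l = false from by simpa using hq]
          simp only [Bool.false_eq_true, if_false, Bool.or_assoc, Prod.mk.injEq]
          exact ⟨trivial, by ring⟩
      · -- last line: no newline in the rest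
        have hnl : '\n' ∉ (c :: cs') := hmem
        rw [pvScanB.eq_def]
        simp only []
        have hmatch : ((c :: cs').dropWhile pvIsWS).dropWhile (fun x => !(x == '\n')) = [] := by
          rw [List.dropWhile_eq_nil_iff]
          intro ch hc
          have hcl : ch ∈ (c :: cs') := (List.dropWhile_suffix pvIsWS).subset hc
          have : ch ≠ '\n' := fun he => hnl (he ▸ hcl)
          simpa using this
        rw [hmatch]
        simp only [List.drop_nil]
        have happ : (c :: cs').dropWhile pvIsWS = (c :: cs').dropWhile pvIsWS ++ [] := by
          rw [List.append_nil]
        rw [happ]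
        rw [pv_step_eq (c :: cs') [] hnl hdom (Or.inl rfl) imp d]
        rw [pvScanB]
        rw [pv_splitOn_noNl _ hnl]
        rw [List.any_cons, List.filter_cons]
        by_cases hq : pvQA (c :: cs') = true
        · rw [hq]
          simp
        · rw [show pvQA (c :: cs') = false from by simpa using hq]
          simp

theorem pv_split_lines (code : String) :
    (PySem.Str.split? code "\n").getD []
      = (PySem.Chars.splitOn code.toList ['\n']).map String.ofList := by
  rw [PySem.Str.split?]
  have h1 : ("\n" : String).toList = ['\n'] := by decide
  rw [h1, PySem.Chars.split?]
  simp

theorem pv_pa_of (l : List Char) :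
    (PySem.Str.startswith (PySem.Str.strip (String.ofList l)) "import "
      || PySem.Str.startswith (PySem.Str.strip (String.ofList l)) "from ") = pvPA l := by
  simp [PySem.Str.startswith, PySem.Str.strip, String.toList_ofList, pvPA]

theorem pv_qa_of (l : List Char) :
    PySem.Str.startswith (PySem.Str.strip (String.ofList l)) "def " = pvQA l := by
  simp [PySem.Str.startswith, PySem.Str.strip, String.toList_ofList, pvQA]

-- ===== VERDICT (by name: the statement is the Claim_ definition above) =====
theorem validate_code_structure_py_spec : Claim_equal_validate_code_structure_py := by
  intro code hdom
  show validate_code_structure_py code = validate_code_structure_py_alt code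
  have hdom' : ∀ c ∈ code.toList, pvDomChar c = true := by
    rw [Dom_validate_code_structure_py, pvDomStr, List.all_eq_true] at hdom
    exact fun c hc => hdom c hc
  have hscan := pv_scan_eq code.toList.length code.toList le_rfl false 0 hdom'
  rw [validate_code_structure_py, validate_code_structure_py_alt]
  have h3 : ((PySem.Str.split? code "\n").getD []).any (fun line =>
      PySem.Str.startswith (PySem.Str.strip line) "import " ||
      PySem.Str.startswith (PySem.Str.strip line) "from ")
      = (pvScanB code.toList false 0).1 := by
    rw [pv_split_lines, List.any_map, hscan]
    simp only [Function.comp_def, pv_pa_of, Bool.false_or]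
  have h4 : (((PySem.Str.split? code "\n").getD []).filter (fun line =>
      PySem.Str.startswith (PySem.Str.strip line) "def ")).length
      = ((PySem.Chars.splitOn code.toList ['\n']).filter pvQA).length := by
    rw [pv_split_lines, List.filter_map, List.length_map]
    simp only [Function.comp_def, pv_qa_of]
  have h4' : ((((PySem.Str.split? code "\n").getD []).filter (fun line =>
      PySem.Str.startswith (PySem.Str.strip line) "def ")).length > 1)
      = ((pvScanB code.toList false 0).2 > 1) := by
    rw [h4, hscan]
    simp only [Int.zero_add]
    rw [eq_iff_iff]
    omega
  rw [h3]
  simp only [h4']
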